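-- pv_equiv track=rewrite | github.com/nuagetsu/VecRepV3 | src/data_processing/.ipynb_checkpoints/ImageGenerators-checkpoint.py | add_permutations
-- ===== SOURCE A (Python) =====
-- def shift_down(comb: tuple, side: int):
--     """
--     Translates the image downwards.
--     :param comb: Combination of vertices.
--     :param side: Length of image.
--     :return: Shapes simulated to be shifted downwards.
--     """
--     new = []
--     for i in comb:
--         j = i + side
--         if j >= side ** 2:
--             return comb
--         new.append(j)
--     new = tuple(new)
--     return new
--
-- def shift_right(comb: tuple, side: int):
--     """
--     Translates the image to the right.
--     :param comb: Combination of vertices.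
--     :param side: Length of image.
--     :return: Shapes simulated to be shifted right.
--     """
--     new = []
--     for i in comb:
--         whole = i // side
--         rem = i - (whole * side)
--         if rem + 1 >= side:
--             return comb
--         new.append(whole * side + (rem + 1))
--     new = tuple(new)
--     return new
--
-- def add_permutations(permutations: set, comb_tuple: tuple, size: int):
--     """
--     Finds translationally similar permutations of an image. Simulates the translationally unique filter.
--     :param permutations: Set of all current translations.
--     :param comb_tuple: Combination tuple to test.
--     :param size: Size of image.
--     :return: Set of translationally similar permutations with new translations added.
--     """
--     for dr in range(size):
--         comb_tuple_down = comb_tuple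
--         for dc in range(size):
--             permutations.add(comb_tuple_down)
--             comb_tuple_down = shift_down(comb_tuple_down, size)
--         comb_tuple = shift_right(comb_tuple, size)
--     return permutations
-- ===== SOURCE B (Python) =====
-- def add_permutations(permutations: set, comb_tuple: tuple, size: int):
--     # Closed form: compute from the coordinates how many right and down
--     # translations are legal, then enumerate exactly those tuples directly.
--     if size <= 0:
--         return permutations
--     if not comb_tuple:
--         permutations.add(comb_tuple)
--         return permutations
--     m = max(comb_tuple)
--     right = min(size - 1 - i % size for i in comb_tuple)
--     for dc in range(min(size, right + 1)):
--         down = (size * size - 1 - (m + dc)) // size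
--         for dr in range(min(size, max(down, 0) + 1)):
--             permutations.add(tuple(i + dc + dr * size for i in comb_tuple))
--     return permutations
-- ===== Notes on version B (the rewrite author's own statement) =====
-- stated objective: faster
-- what changed: B replaces A's size*size grid of iterated shift_down/shift_right calls by a closed form: it computes the maximum vertex and the minimal in-row margin once, derives from them how many right and down translations are legal, and enumerates exactly those translated tuples by arithmetic, never calling or simulating the shift functions.
import Mathlib
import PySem

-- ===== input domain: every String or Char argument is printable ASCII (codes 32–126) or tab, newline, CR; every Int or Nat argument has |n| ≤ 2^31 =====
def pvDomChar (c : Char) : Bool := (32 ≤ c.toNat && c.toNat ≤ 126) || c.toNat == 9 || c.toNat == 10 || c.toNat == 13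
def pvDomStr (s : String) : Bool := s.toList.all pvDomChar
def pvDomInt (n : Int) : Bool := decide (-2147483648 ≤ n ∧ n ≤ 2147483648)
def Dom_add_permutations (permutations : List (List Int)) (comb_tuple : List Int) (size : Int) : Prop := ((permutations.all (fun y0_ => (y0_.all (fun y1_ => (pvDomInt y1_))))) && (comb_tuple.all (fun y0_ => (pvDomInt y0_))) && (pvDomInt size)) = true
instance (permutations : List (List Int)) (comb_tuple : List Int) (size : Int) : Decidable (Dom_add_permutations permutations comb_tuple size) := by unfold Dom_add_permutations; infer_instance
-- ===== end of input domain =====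

-- B replaces A's iterated shift-and-add grid walk by a closed form: it computes from the
-- coordinates how many right and down translations are legal and enumerates exactly those.
-- NOTE: the Python A mutates the argument set in place; the equivalence proved here is
-- about the RETURN value only (B performs the same mutation).


-- ===== PORT A =====
-- shift_down: builds `new` element by element, returning `comb` on the first overflow
def pvShiftDownGo (comb : List Int) (side : Int) : List Int → List Int → List Int
  | [], new => new
  | i :: rest, new =>
    let j := i + side
    if j ≥ side ^ 2 then comb else pvShiftDownGo comb side rest (new ++ [j])

def pvShiftDown (comb : List Int) (side : Int) : List Int := pvShiftDownGo comb side comb []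

-- shift_right: whole = i // side, rem = i - whole*side; returns `comb` on the first edge hit
def pvShiftRightGo (comb : List Int) (side : Int) : List Int → List Int → List Int
  | [], new => new
  | i :: rest, new =>
    let whole := PySem.Int.floordiv i side
    let rem := i - whole * side
    if rem + 1 ≥ side then comb
    else pvShiftRightGo comb side rest (new ++ [whole * side + (rem + 1)])

def pvShiftRight (comb : List Int) (side : Int) : List Int := pvShiftRightGo comb side comb []

def add_permutations (permutations : List (List Int)) (comb_tuple : List Int) (size : Int) : List (List Int) :=
  ((PySem.List.pyRange 0 size 1).foldl
    (fun (st : List (List Int) × List Int) _dr =>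
      let inner := (PySem.List.pyRange 0 size 1).foldl
        (fun (st2 : List (List Int) × List Int) _dc =>
          (PySem.Set.add st2.1 st2.2, pvShiftDown st2.2 size)) (st.1, st.2)
      (inner.1, pvShiftRight st.2 size))
    (permutations, comb_tuple)).1

-- ===== PORT B =====
-- closed form: m = max(comb_tuple) (Python max of a nonempty tuple = the running-max fold),
-- right = min(size-1 - i%size), then enumerate exactly the legal translations
def add_permutations_alt (permutations : List (List Int)) (comb_tuple : List Int) (size : Int) : List (List Int) :=
  if size ≤ 0 then permutations
  else
    match comb_tuple with
    | [] => PySem.Set.add permutations comb_tuple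
    | c :: rest =>
      let m := rest.foldl max c
      let right := (rest.map (fun i => size - 1 - PySem.Int.mod i size)).foldl min
        (size - 1 - PySem.Int.mod c size)
      (PySem.List.pyRange 0 (min size (right + 1)) 1).foldl
        (fun p dc =>
          let down := PySem.Int.floordiv (size * size - 1 - (m + dc)) size
          (PySem.List.pyRange 0 (min size (max down 0 + 1)) 1).foldl
            (fun p2 dr => PySem.Set.add p2 ((c :: rest).map (fun i => i + dc + dr * size))) p)
        permutations

-- ===== PRECONDITION & SPEC =====
def Spec_add_permutations (permutations : List (List Int)) (comb_tuple : List Int) (size : Int) (out : List (List Int)) : Prop := out = add_permutations_alt permutations comb_tuple size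
instance (permutations : List (List Int)) (comb_tuple : List Int) (size : Int) (out : List (List Int)) : Decidable (Spec_add_permutations permutations comb_tuple size out) := by unfold Spec_add_permutations; infer_instance

-- ===== CLAIM (what is proved, stated in full; the proofs are below) =====
def Claim_equal_add_permutations : Prop := ∀ (permutations : List (List Int)) (comb_tuple : List Int) (size : Int), Dom_add_permutations permutations comb_tuple size → Spec_add_permutations permutations comb_tuple size (add_permutations permutations comb_tuple size)

-- ===== LEMMAS AND PROOFS =====

-- A's loops as Nat-iterations
def pvStepDown (size : Int) (st : List (List Int) × List Int) : List (List Int) × List Int :=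
  (PySem.Set.add st.1 st.2, pvShiftDown st.2 size)

def pvIterDown (size : Int) : Nat → (List (List Int) × List Int) → (List (List Int) × List Int)
  | 0, st => st
  | n + 1, st => pvIterDown size n (pvStepDown size st)

def pvStepOut (size : Int) (st : List (List Int) × List Int) : List (List Int) × List Int :=
  ((pvIterDown size size.toNat st).1, pvShiftRight st.2 size)

def pvIterOut (size : Int) : Nat → (List (List Int) × List Int) → (List (List Int) × List Int)
  | 0, st => st
  | n + 1, st => pvIterOut size n (pvStepOut size st)

-- the early-exit chain walkers used as an intermediate description of both programs
def pvInnerB (size : Int) : Nat → List (List Int) → List Int → List (List Int)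
  | 0, perms, _ => perms
  | n + 1, perms, cur =>
    let perms' := PySem.Set.add perms cur
    if cur.any (fun i => i + size ≥ size * size) then perms'
    else pvInnerB size n perms' (cur.map (· + size))

def pvOuterB (size : Int) : Nat → List (List Int) → List Int → List (List Int)
  | 0, perms, _ => perms
  | n + 1, perms, row =>
    let perms' := pvInnerB size size.toNat perms row
    if row.any (fun i => PySem.Int.mod i size ≥ size - 1) then perms'
    else pvOuterB size n perms' (row.map (· + 1))

lemma foldl_const_eq_iter {σ : Type} (g : σ → σ) (l : List Int) (st : σ)
    (iter : Nat → σ → σ) (h0 : ∀ s, iter 0 s = s) (hS : ∀ n s, iter (n+1) s = iter n (g s)) :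
    l.foldl (fun s _ => g s) st = iter l.length st := by
  induction l generalizing st with
  | nil => simp [h0]
  | cons x xs ih => simp [List.foldl, ih, hS]

lemma add_permutations_eq_iter (permutations : List (List Int)) (comb_tuple : List Int) (size : Int) :
    add_permutations permutations comb_tuple size
      = (pvIterOut size size.toNat (permutations, comb_tuple)).1 := by
  unfold add_permutations
  have hinner : ∀ st : List (List Int) × List Int,
      (PySem.List.pyRange 0 size 1).foldl
        (fun (st2 : List (List Int) × List Int) _dc =>
          (PySem.Set.add st2.1 st2.2, pvShiftDown st2.2 size)) (st.1, st.2)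
      = pvIterDown size size.toNat st := by
    intro st
    have := foldl_const_eq_iter (pvStepDown size) (PySem.List.pyRange 0 size 1) st
      (pvIterDown size) (fun _ => rfl) (fun _ _ => rfl)
    simpa [PySem.List.length_pyRange_one, pvStepDown] using this
  have hout : (PySem.List.pyRange 0 size 1).foldl
      (fun (st : List (List Int) × List Int) _dr =>
        let inner := (PySem.List.pyRange 0 size 1).foldl
          (fun (st2 : List (List Int) × List Int) _dc =>
            (PySem.Set.add st2.1 st2.2, pvShiftDown st2.2 size)) (st.1, st.2)
        (inner.1, pvShiftRight st.2 size)) (permutations, comb_tuple)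
      = pvIterOut size size.toNat (permutations, comb_tuple) := by
    have := foldl_const_eq_iter (pvStepOut size) (PySem.List.pyRange 0 size 1)
      (permutations, comb_tuple) (pvIterOut size) (fun _ => rfl) (fun _ _ => rfl)
    simp only [PySem.List.length_pyRange_one, Int.sub_zero] at this
    rw [← this]
    apply List.foldl_ext
    intro st _ _
    simp only [hinner st, pvStepOut]
  rw [hout]

-- shift_down returns comb unchanged iff some element would leave the grid
lemma shiftDownGo_fail (side : Int) (comb l new : List Int)
    (h : ∃ i ∈ l, i + side ≥ side ^ 2) :
    pvShiftDownGo comb side l new = comb := by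
  induction l generalizing new with
  | nil => simp at h
  | cons x xs ih =>
    rcases h with ⟨i, hi, hge⟩
    rcases List.mem_cons.1 hi with rfl | hmem
    · simp [pvShiftDownGo, hge]
    · by_cases hx : x + side ≥ side ^ 2
      · simp [pvShiftDownGo, hx]
      · simp only [pvShiftDownGo, if_neg hx]
        exact ih _ ⟨i, hmem, hge⟩

lemma shiftDownGo_ok (side : Int) (comb l new : List Int)
    (h : ∀ i ∈ l, ¬ (i + side ≥ side ^ 2)) :
    pvShiftDownGo comb side l new = new ++ l.map (· + side) := by
  induction l generalizing new with
  | nil => simp [pvShiftDownGo]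
  | cons x xs ih =>
    simp only [pvShiftDownGo, if_neg (h x (by simp))]
    rw [ih _ (fun i hi => h i (by simp [hi]))]
    simp

lemma shiftDown_fail (side : Int) (comb : List Int)
    (h : comb.any (fun i => i + side ≥ side * side) = true) :
    pvShiftDown comb side = comb := by
  apply shiftDownGo_fail
  rcases List.any_eq_true.1 h with ⟨i, hi, hd⟩
  exact ⟨i, hi, by have := of_decide_eq_true hd; linarith [sq i, sq side, (by ring_nf : side ^ 2 = side * side)]⟩

lemma shiftDown_ok (side : Int) (comb : List Int)
    (h : comb.any (fun i => i + side ≥ side * side) = false) :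
    pvShiftDown comb side = comb.map (· + side) := by
  have h' : ∀ i ∈ comb, ¬ (i + side ≥ side ^ 2) := by
    intro i hi
    have := List.any_eq_false.1 h i hi
    intro hge
    exact this (decide_eq_true (by nlinarith [hge, (by ring : side ^ 2 = side * side)]))
  simpa using shiftDownGo_ok side comb comb [] h'

-- shift_right: rem = i - (i//side)*side = i % side; success maps i to i + 1
lemma shiftRightGo_fail (side : Int) (comb l new : List Int)
    (h : ∃ i ∈ l, i - PySem.Int.floordiv i side * side + 1 ≥ side) :
    pvShiftRightGo comb side l new = comb := by
  induction l generalizing new with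
  | nil => simp at h
  | cons x xs ih =>
    rcases h with ⟨i, hi, hge⟩
    rcases List.mem_cons.1 hi with rfl | hmem
    · simp [pvShiftRightGo, hge]
    · by_cases hx : x - PySem.Int.floordiv x side * side + 1 ≥ side
      · simp [pvShiftRightGo, hx]
      · simp only [pvShiftRightGo, if_neg hx]
        exact ih _ ⟨i, hmem, hge⟩

lemma shiftRightGo_ok (side : Int) (comb l new : List Int)
    (h : ∀ i ∈ l, ¬ (i - PySem.Int.floordiv i side * side + 1 ≥ side)) :
    pvShiftRightGo comb side l new = new ++ l.map (· + 1) := by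
  induction l generalizing new with
  | nil => simp [pvShiftRightGo]
  | cons x xs ih =>
    simp only [pvShiftRightGo, if_neg (h x (by simp))]
    rw [ih _ (fun i hi => h i (by simp [hi]))]
    have : PySem.Int.floordiv x side * side + (x - PySem.Int.floordiv x side * side + 1) = x + 1 := by ring
    simp [this]

lemma rem_eq_mod (i side : Int) : i - PySem.Int.floordiv i side * side = PySem.Int.mod i side := by
  have := PySem.Int.floordiv_mul_add_mod i side
  linarith

lemma shiftRight_fail (side : Int) (comb : List Int)
    (h : comb.any (fun i => PySem.Int.mod i side ≥ side - 1) = true) :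
    pvShiftRight comb side = comb := by
  apply shiftRightGo_fail
  rcases List.any_eq_true.1 h with ⟨i, hi, hd⟩
  have := of_decide_eq_true hd
  exact ⟨i, hi, by rw [rem_eq_mod]; omega⟩

lemma shiftRight_ok (side : Int) (comb : List Int)
    (h : comb.any (fun i => PySem.Int.mod i side ≥ side - 1) = false) :
    pvShiftRight comb side = comb.map (· + 1) := by
  have h' : ∀ i ∈ comb, ¬ (i - PySem.Int.floordiv i side * side + 1 ≥ side) := by
    intro i hi
    have := List.any_eq_false.1 h i hi
    rw [rem_eq_mod]
    intro hge
    exact this (decide_eq_true (by omega))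
  simpa using shiftRightGo_ok side comb comb [] h'

-- the down-chain of translations added by A's inner loop
def pvChain (size : Int) : Nat → List Int → List (List Int)
  | 0, _ => []
  | n + 1, cur => cur :: pvChain size n (pvShiftDown cur size)

lemma iterDown_fst (size : Int) (n : Nat) (p : List (List Int)) (cur : List Int) :
    (pvIterDown size n (p, cur)).1 = PySem.Set.update p (pvChain size n cur) := by
  induction n generalizing p cur with
  | zero => rfl
  | succ n ih =>
    show (pvIterDown size n (PySem.Set.add p cur, pvShiftDown cur size)).1 = _
    rw [ih, pvChain, PySem.Set.update_cons]

lemma chain_fix (size : Int) (cur : List Int) (hfix : pvShiftDown cur size = cur) (n : Nat) :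
    pvChain size n cur = List.replicate n cur := by
  induction n with
  | zero => rfl
  | succ n ih => simp [pvChain, hfix, ih, List.replicate_succ]

lemma update_of_subset (s : List (List Int)) (xs : List (List Int))
    (h : ∀ x ∈ xs, x ∈ s) : PySem.Set.update s xs = s := by
  induction xs generalizing s with
  | nil => rfl
  | cons x xs ih =>
    rw [PySem.Set.update_cons, PySem.Set.add_of_mem (h x (by simp))]
    exact ih s (fun y hy => h y (by simp [hy]))

lemma innerB_eq_update (size : Int) (n : Nat) (p : List (List Int)) (cur : List Int) :
    pvInnerB size n p cur = PySem.Set.update p (pvChain size n cur) := by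
  induction n generalizing p cur with
  | zero => rfl
  | succ n ih =>
    by_cases hc : cur.any (fun i => i + size ≥ size * size) = true
    · have hfix := shiftDown_fail size cur hc
      simp only [pvInnerB, hc, if_true]
      rw [pvChain, PySem.Set.update_cons, hfix, chain_fix size cur hfix,
        update_of_subset]
      intro x hx
      rw [List.eq_of_mem_replicate hx]
      simp [PySem.Set.mem_add]
    · have hc' : cur.any (fun i => i + size ≥ size * size) = false := by
        simpa using hc
      simp only [pvInnerB, hc', Bool.false_eq_true, if_false]
      rw [ih, pvChain, PySem.Set.update_cons, shiftDown_ok size cur hc']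

lemma mem_update_of_mem (s : List (List Int)) (xs : List (List Int)) (x : List Int)
    (h : x ∈ xs) : x ∈ PySem.Set.update s xs :=
  (PySem.Set.mem_update _ _ _).2 (Or.inr h)

lemma iterOut_fst (size : Int) (n : Nat) (p : List (List Int)) (row : List Int) :
    (pvIterOut size n (p, row)).1 = pvOuterB size n p row := by
  induction n generalizing p row with
  | zero => rfl
  | succ n ih =>
    show (pvIterOut size n (pvStepOut size (p, row))).1 = _
    by_cases hc : row.any (fun i => PySem.Int.mod i size ≥ size - 1) = true
    · -- shift_right is a no-move: A keeps re-adding the same chain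
      have hfix := shiftRight_fail size row hc
      simp only [pvOuterB, hc, if_true]
      have hstep : pvStepOut size (p, row)
          = (PySem.Set.update p (pvChain size size.toNat row), row) := by
        simp [pvStepOut, iterDown_fst, hfix]
      rw [hstep, innerB_eq_update]
      -- remaining n outer iterations leave the set unchanged
      clear ih hstep
      induction n with
      | zero => rfl
      | succ n ihn =>
        show (pvIterOut size n (pvStepOut size _)).1 = _
        have hstep2 : pvStepOut size (PySem.Set.update p (pvChain size size.toNat row), row)
            = (PySem.Set.update p (pvChain size size.toNat row), row) := by
          simp only [pvStepOut, iterDown_fst, hfix]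
          rw [update_of_subset]
          intro x hx
          exact mem_update_of_mem p _ x hx
        rw [hstep2]
        exact ihn
    · have hc' : row.any (fun i => PySem.Int.mod i size ≥ size - 1) = false := by
        simpa using hc
      simp only [pvOuterB, hc', Bool.false_eq_true, if_false]
      have hstep : pvStepOut size (p, row)
          = (pvInnerB size size.toNat p row, row.map (· + 1)) := by
        simp [pvStepOut, iterDown_fst, innerB_eq_update, shiftRight_ok size row hc']
      rw [hstep, ih]

-- ===== closed-form characterisation (B side) =====

-- the list of down-translations B enumerates for one row whose maximum is m
def pvDownList (s : Int) (n : Nat) (row : List Int) (m : Int) : List (List Int) :=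
  (List.range (min n ((max (PySem.Int.floordiv (s * s - 1 - m) s) 0).toNat + 1))).map
    (fun (dr : Nat) => row.map (fun i => i + (dr : Int) * s))

lemma foldl_add_eq_update {α : Type} (g : α → List Int) (l : List α) (p : List (List Int)) :
    l.foldl (fun q x => PySem.Set.add q (g x)) p = PySem.Set.update p (l.map g) := by
  induction l generalizing p with
  | nil => rfl
  | cons x xs ih => rw [List.foldl_cons, List.map_cons, PySem.Set.update_cons, ih]

lemma innerB_closed (s : Int) (hs : 0 < s) :
    ∀ (n : Nat) (p : List (List Int)) (row : List Int) (m : Int),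
      m ∈ row → (∀ i ∈ row, i ≤ m) →
      pvInnerB s n p row = PySem.Set.update p (pvDownList s n row m) := by
  intro n
  induction n with
  | zero => intro p row m _ _; simp [pvInnerB, pvDownList, PySem.Set.update]
  | succ n ih =>
    intro p row m hmem hub
    by_cases hge : m + s ≥ s * s
    · have hany : row.any (fun i => i + s ≥ s * s) = true :=
        List.any_eq_true.2 ⟨m, hmem, decide_eq_true hge⟩
      have hd : PySem.Int.floordiv (s * s - 1 - m) s < 1 := by
        rw [PySem.Int.floordiv_lt_iff_lt_mul hs]; omega
      have hcnt : min (n + 1) ((max (PySem.Int.floordiv (s * s - 1 - m) s) 0).toNat + 1) = 1 := by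
        omega
      simp only [pvInnerB, hany, if_true, pvDownList, hcnt]
      have : row.map (fun i => i + ((0 : Nat) : Int) * s) = row := by
        simp
      simp [List.range_succ, PySem.Set.update]
    · have hany : row.any (fun i => i + s ≥ s * s) = false := by
        apply List.any_eq_false.2
        intro i hi
        simp only [decide_eq_true_eq]
        have := hub i hi
        omega
      have hd : 1 ≤ PySem.Int.floordiv (s * s - 1 - m) s := by
        rw [PySem.Int.le_floordiv_iff_mul_le hs]; omega
      simp only [pvInnerB, hany, Bool.false_eq_true, if_false]
      have hrec := ih (PySem.Set.add p row) (row.map (· + s)) (m + s)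
        (List.mem_map.2 ⟨m, hmem, rfl⟩)
        (by intro i hi; rcases List.mem_map.1 hi with ⟨j, hj, rfl⟩; have := hub j hj; omega)
      rw [hrec]
      -- relate the two down-lists
      have hdd : PySem.Int.floordiv (s * s - 1 - (m + s)) s
          = PySem.Int.floordiv (s * s - 1 - m) s - 1 := by
        rw [PySem.Int.floordiv_eq_ediv_of_pos hs, PySem.Int.floordiv_eq_ediv_of_pos hs]
        have : s * s - 1 - (m + s) = (s * s - 1 - m) + (-1) * s := by ring
        rw [this, Int.add_mul_ediv_right _ _ (by omega : s ≠ 0)]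
        ring
      set d := PySem.Int.floordiv (s * s - 1 - m) s with hdef
      have hcnt : min (n + 1) ((max d 0).toNat + 1)
          = min n ((max (d - 1) 0).toNat + 1) + 1 := by omega
      rw [pvDownList, pvDownList, hdd, ← hdef, hcnt, List.range_succ_eq_map,
        List.map_cons, List.map_map, PySem.Set.update_cons]
      congr 1
      · simp
      · apply List.map_congr_left
        intro dr _
        simp only [Function.comp]
        rw [List.map_map]
        apply List.map_congr_left
        intro i _
        simp only [Function.comp]
        push_cast
        ring

-- incrementing a point moves its in-row remainder by one while it is not at the edge
lemma mod_succ_of_lt (s i : Int) (hs : 0 < s) (h : PySem.Int.mod i s + 1 < s) :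
    PySem.Int.mod (i + 1) s = PySem.Int.mod i s + 1 := by
  rw [PySem.Int.mod_eq_emod_of_pos hs] at h
  rw [PySem.Int.mod_eq_emod_of_pos hs, PySem.Int.mod_eq_emod_of_pos hs]
  have hb1 : (0 : Int) ≤ i % s := Int.emod_nonneg i (by omega)
  have h1 : (1 : Int) % s = 1 := Int.emod_eq_of_lt (by omega) (by omega)
  rw [Int.add_emod, h1]
  exact Int.emod_eq_of_lt (by omega) (by omega)

lemma outerB_closed (s : Int) (hs : 0 < s) :
    ∀ (n : Nat) (p : List (List Int)) (row : List Int) (m rc : Int),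
      m ∈ row → (∀ i ∈ row, i ≤ m) →
      (∃ i ∈ row, s - 1 - PySem.Int.mod i s = rc) →
      (∀ i ∈ row, rc ≤ s - 1 - PySem.Int.mod i s) →
      pvOuterB s n p row
        = (List.range (min n (rc.toNat + 1))).foldl
            (fun q (dc : Nat) => PySem.Set.update q
              (pvDownList s s.toNat (row.map (fun i => i + (dc : Int))) (m + (dc : Int)))) p := by
  intro n
  induction n with
  | zero => intro p row m rc _ _ _ _; simp [pvOuterB]
  | succ n ih =>
    intro p row m rc hmem hub hat hlb
    have hrc0 : 0 ≤ rc := by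
      rcases hat with ⟨i, hi, hrc⟩
      have := PySem.Int.mod_lt i hs
      omega
    have hclosed := innerB_closed s hs s.toNat p row m hmem hub
    by_cases hz : rc = 0
    · subst hz
      have hany : row.any (fun i => PySem.Int.mod i s ≥ s - 1) = true := by
        rcases hat with ⟨i, hi, hrc⟩
        exact List.any_eq_true.2 ⟨i, hi, decide_eq_true (by omega)⟩
      have hcnt : min (n + 1) ((0 : Int).toNat + 1) = 1 := by omega
      simp only [pvOuterB, hany, if_true, hcnt, List.range_succ, List.range_zero,
        List.nil_append, List.foldl_cons, List.foldl_nil]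
      rw [hclosed]
      simp
    · have hrc1 : 1 ≤ rc := by omega
      have hany : row.any (fun i => PySem.Int.mod i s ≥ s - 1) = false := by
        apply List.any_eq_false.2
        intro i hi
        simp only [decide_eq_true_eq]
        have := hlb i hi
        omega
      simp only [pvOuterB, hany, Bool.false_eq_true, if_false]
      have hmodstep : ∀ i ∈ row, PySem.Int.mod (i + 1) s = PySem.Int.mod i s + 1 := by
        intro i hi
        exact mod_succ_of_lt s i hs (by have := hlb i hi; omega)
      have hrec := ih (PySem.Set.update p (pvDownList s s.toNat row m))
        (row.map (· + 1)) (m + 1) (rc - 1)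
        (List.mem_map.2 ⟨m, hmem, rfl⟩)
        (by intro i hi; rcases List.mem_map.1 hi with ⟨j, hj, rfl⟩; have := hub j hj; omega)
        (by rcases hat with ⟨i, hi, hrc⟩
            exact ⟨i + 1, List.mem_map.2 ⟨i, hi, rfl⟩, by rw [hmodstep i hi]; omega⟩)
        (by intro i hi; rcases List.mem_map.1 hi with ⟨j, hj, rfl⟩
            rw [hmodstep j hj]; have := hlb j hj; omega)
      rw [hclosed, hrec]
      have hcnt : min (n + 1) (rc.toNat + 1) = min n ((rc - 1).toNat + 1) + 1 := by omega
      rw [hcnt, List.range_succ_eq_map, List.foldl_cons, List.foldl_map]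
      have hinit : PySem.Set.update p
          (pvDownList s s.toNat (row.map (fun i => i + (((0 : Nat)) : Int))) (m + ((0 : Nat) : Int)))
          = PySem.Set.update p (pvDownList s s.toNat row m) := by simp
      rw [hinit]
      apply List.foldl_ext
      intro q dc _
      congr 2
      · rw [List.map_map]
        apply List.map_congr_left
        intro i _
        simp only [Function.comp]
        push_cast
        ring
      · push_cast
        ring

-- the trivial rows: an empty combination is a fixpoint of both shifts
lemma innerB_nil (s : Int) (k : Nat) (p : List (List Int)) :
    pvInnerB s (k + 1) p [] = PySem.Set.add p [] := by
  induction k generalizing p with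
  | zero => rfl
  | succ k ih =>
    show pvInnerB s (k + 1) (PySem.Set.add p []) [] = _
    rw [ih, PySem.Set.add_of_mem]
    simp [PySem.Set.mem_add]

lemma outerB_nil (s : Int) (hs : 0 < s) (k : Nat) (p : List (List Int)) :
    pvOuterB s (k + 1) p [] = PySem.Set.add p [] := by
  obtain ⟨t, ht⟩ : ∃ t, s.toNat = t + 1 := ⟨s.toNat - 1, by omega⟩
  induction k generalizing p with
  | zero =>
    show pvInnerB s s.toNat p [] = _
    rw [ht, innerB_nil]
  | succ k ih =>
    show pvOuterB s (k + 1) (pvInnerB s s.toNat p []) [] = _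
    rw [ht, innerB_nil, ih, PySem.Set.add_of_mem]
    simp [PySem.Set.mem_add]

-- assembling B's closed form against the chain walker
lemma outerB_eq_alt (p : List (List Int)) (comb : List Int) (s : Int) :
    pvOuterB s s.toNat p comb = add_permutations_alt p comb s := by
  by_cases hs : s ≤ 0
  · have : s.toNat = 0 := by omega
    rw [this]
    simp [pvOuterB, add_permutations_alt, hs]
  · have hs' : 0 < s := by omega
    match comb with
    | [] =>
      obtain ⟨t, ht⟩ : ∃ t, s.toNat = t + 1 := ⟨s.toNat - 1, by omega⟩
      rw [ht, outerB_nil s hs' t p]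
      simp [add_permutations_alt, hs]
    | c :: rest =>
      -- the max and the right-capacity with their specs
      set m := rest.foldl max c with hm
      have hmmem : m ∈ c :: rest := by
        rcases PySem.List.foldl_max_mem rest c with h | h
        · rw [hm, h]; exact List.mem_cons_self
        · exact List.mem_cons_of_mem c (hm ▸ h)
      have hmub : ∀ i ∈ c :: rest, i ≤ m := by
        intro i hi
        rcases List.mem_cons.1 hi with rfl | hi
        · exact (PySem.List.le_foldl_max rest i).1
        · exact (PySem.List.le_foldl_max rest c).2 i hi
      set f : Int → Int := fun i => s - 1 - PySem.Int.mod i s with hf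
      set rc := (rest.map f).foldl min (f c) with hrc
      have hat : ∃ i ∈ c :: rest, f i = rc := by
        rcases PySem.List.foldl_min_mem (rest.map f) (f c) with h | h
        · exact ⟨c, List.mem_cons_self, by rw [hrc, h]⟩
        · rcases List.mem_map.1 (hrc ▸ h) with ⟨i, hi, hfi⟩
          exact ⟨i, List.mem_cons_of_mem c hi, hfi⟩
      have hlb : ∀ i ∈ c :: rest, rc ≤ f i := by
        intro i hi
        rcases List.mem_cons.1 hi with rfl | hi
        · exact (PySem.List.foldl_min_le (rest.map f) (f i)).1
        · exact (PySem.List.foldl_min_le (rest.map f) (f c)).2 (f i) (List.mem_map.2 ⟨i, hi, rfl⟩)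
      have hrc0 : 0 ≤ rc := by
        rcases hat with ⟨i, _, hfi⟩
        have h1 := PySem.Int.mod_lt i hs'
        simp only [hf] at hfi
        omega
      rw [outerB_closed s hs' s.toNat p (c :: rest) m rc hmmem hmub
        (by rcases hat with ⟨i, hi, hfi⟩; exact ⟨i, hi, hfi⟩) hlb]
      -- unfold B and convert its Int pyRanges to Nat ranges
      show _ = add_permutations_alt p (c :: rest) s
      rw [add_permutations_alt]
      simp only [if_neg hs]
      have houtcnt : min s (rc + 1) = ((min s.toNat (rc.toNat + 1) : Nat) : Int) := by
        push_cast; omega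
      rw [houtcnt, PySem.List.pyRange_zero_natCast, List.foldl_map]
      apply List.foldl_ext
      intro q dc _
      -- one outer step: the inner pyRange fold is exactly the down-list update
      set row := (c :: rest).map (fun i => i + (dc : Int)) with hrow
      set d := PySem.Int.floordiv (s * s - 1 - (m + (dc : Int))) s with hd
      have hincnt : min s (max d 0 + 1) = ((min s.toNat ((max d 0).toNat + 1) : Nat) : Int) := by
        push_cast; omega
      rw [hincnt, PySem.List.pyRange_zero_natCast, List.foldl_map,
        foldl_add_eq_update]
      congr 1
      rw [pvDownList, ← hd]
      apply List.map_congr_left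
      intro dr _
      rw [hrow, List.map_map]
      apply List.map_congr_left
      intro i _
      simp only [Function.comp]

-- ===== VERDICT (by name: the statement is the Claim_ definition above) =====
theorem add_permutations_spec : Claim_equal_add_permutations := by
  intro permutations comb_tuple size _
  show add_permutations permutations comb_tuple size = add_permutations_alt permutations comb_tuple size
  rw [add_permutations_eq_iter, iterOut_fst, outerB_eq_alt]
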